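-- pv_equiv track=rewrite | github.com/jagdish-git/Interview-Programs | 34.py | count_str_rev
-- ===== SOURCE A (Python) =====
-- def count_str_rev(string):
--     d = {}
--     res = ''
--     for i in string:
--         d[i] = d.get(i,0)+ 1
--     for k in d.keys():
--         if k != ' ':
--             res = k + str(d[k]) + res
--     return res
-- ===== SOURCE B (Python) =====
-- def count_str_rev(string):
--     # Recursive decomposition: handle the first character (count all its
--     # occurrences, strip them out), recurse on the shrunken remainder, and
--     # append that character's token at the end.
--     if string == '':
--         return ''
--     c = string[0]
--     rest = string.replace(c, '')
--     token = '' if c == ' ' else c + str(string.count(c))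
--     return count_str_rev(rest) + token
-- ===== Notes on version B (the rewrite author's own statement) =====
-- stated objective: alternative
-- what changed: Replaces A's dict-building pass plus key loop with a recursion on the string: count and strip all occurrences of the first character, recurse on the remainder, and append that character's token at the end (no dict, no explicit ordered key list).
import Mathlib
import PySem

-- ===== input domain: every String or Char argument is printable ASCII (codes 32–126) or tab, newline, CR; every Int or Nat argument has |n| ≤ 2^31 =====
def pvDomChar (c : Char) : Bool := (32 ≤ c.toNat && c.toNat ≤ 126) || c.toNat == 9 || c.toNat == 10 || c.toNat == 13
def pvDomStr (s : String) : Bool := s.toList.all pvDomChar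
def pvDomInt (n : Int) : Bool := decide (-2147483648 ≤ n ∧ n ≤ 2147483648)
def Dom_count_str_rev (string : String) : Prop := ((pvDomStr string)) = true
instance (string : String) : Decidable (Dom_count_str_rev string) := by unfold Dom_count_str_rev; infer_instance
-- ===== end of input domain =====

-- B replaces A's dict-building pass plus key loop by a recursion on the string:
-- count and strip the first character, recurse on the remainder, append its token (alternative decomposition).

-- ===== PORT A =====
def count_str_rev (string : String) : String :=
  -- d = {}; for i in string: d[i] = d.get(i,0)+1
  let d : PySem.Dict Char Int :=
    string.toList.foldl (fun d i => d.insert i (d.getD i 0 + 1)) PySem.Dict.empty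
  -- for k in d.keys(): if k != ' ': res = k + str(d[k]) + res
  -- d[k] is ported as d.getD k 0: k ranges over d.keys, so the lookup never raises
  d.keys.foldl
    (fun res k => if k ≠ ' ' then String.singleton k ++ PySem.Int.toStr (d.getD k 0) ++ res else res)
    ""

-- ===== PORT B =====
-- recursion over the character list; string.replace(c, '') with a single char is exactly filter (· != c),
-- and string.count(c) with a single char is exactly List.count c
def count_str_rev_altGo (l : List Char) : String :=
  match l with
  | [] => ""
  | c :: rest =>
      count_str_rev_altGo ((c :: rest).filter (fun x => x != c)) ++
        (if c == ' ' then "" else String.singleton c ++ PySem.Int.toStr (((c :: rest).count c : Int)))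
termination_by l.length
decreasing_by
  simp only [List.filter, bne_self_eq_false, List.length_cons]
  exact Nat.lt_succ_of_le (List.length_filter_le _ _)

def count_str_rev_alt (string : String) : String :=
  count_str_rev_altGo string.toList

-- ===== PRECONDITION & SPEC =====
def Spec_count_str_rev (string : String) (out : String) : Prop := out = count_str_rev_alt string
instance (string : String) (out : String) : Decidable (Spec_count_str_rev string out) := by unfold Spec_count_str_rev; infer_instance

-- ===== CLAIM (what is proved, stated in full; the proofs are below) =====
def Claim_equal_count_str_rev : Prop := ∀ (string : String), Dom_count_str_rev string → Spec_count_str_rev string (count_str_rev string)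

-- ===== LEMMAS AND PROOFS =====

-- A's output as a fold of tokens over the distinct characters (first-appearance order)
def pvTok (l : List Char) (k : Char) : String :=
  if k ≠ ' ' then String.singleton k ++ PySem.Int.toStr ((l.count k : Int)) else ""

def pvF (l : List Char) : String :=
  (PySem.Set.ofList l).foldl
    (fun res k => if k ≠ ' ' then String.singleton k ++ PySem.Int.toStr ((l.count k : Int)) ++ res else res)
    ""

lemma pv_foldl_add_cons (L : List Char) (s : List Char) (c : Char)
    (h : ∀ x ∈ L, x ≠ c) :
    L.foldl PySem.Set.add (c :: s) = c :: L.foldl PySem.Set.add s := by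
  induction L generalizing s with
  | nil => rfl
  | cons x L ih =>
    have hx : x ≠ c := h x (by simp)
    have hadd : PySem.Set.add (c :: s) x = c :: PySem.Set.add s x := by
      simp [PySem.Set.add, PySem.Set.contains, hx]
      split_ifs <;> simp
    simp only [List.foldl_cons, hadd]
    exact ih _ (fun y hy => h y (by simp [hy]))

lemma pv_foldl_add_skip (L : List Char) (s : List Char) (c : Char) (hc : c ∈ s) :
    (L.filter (fun x => x != c)).foldl PySem.Set.add s = L.foldl PySem.Set.add s := by
  induction L generalizing s with
  | nil => rfl
  | cons x L ih =>
    by_cases hx : x = c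
    · subst hx
      have hadd : PySem.Set.add s x = s := by
        unfold PySem.Set.add
        rw [if_pos ((PySem.Set.contains_iff s x).2 hc)]
      simp only [List.filter_cons, bne_self_eq_false, if_neg Bool.false_ne_true,
        List.foldl_cons, hadd]
      exact ih s hc
    · have hfx : (x != c) = true := by simp [bne, hx]
      have hmem : c ∈ PySem.Set.add s x := (PySem.Set.mem_add s x c).2 (Or.inl hc)
      rw [show List.filter (fun x => x != c) (x :: L) = x :: List.filter (fun x => x != c) L from
        List.filter_cons_of_pos hfx]
      simp only [List.foldl_cons]
      exact ih _ hmem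

lemma pv_ofList_cons (c : Char) (rest : List Char) :
    PySem.Set.ofList (c :: rest) = c :: PySem.Set.ofList (rest.filter (fun x => x != c)) := by
  have h1 : PySem.Set.ofList (c :: rest) = rest.foldl PySem.Set.add [c] := rfl
  have h2 : rest.foldl PySem.Set.add [c]
      = (rest.filter (fun x => x != c)).foldl PySem.Set.add [c] :=
    (pv_foldl_add_skip rest [c] c (by simp)).symm
  have h3 : (rest.filter (fun x => x != c)).foldl PySem.Set.add [c]
      = c :: (rest.filter (fun x => x != c)).foldl PySem.Set.add [] := by
    apply pv_foldl_add_cons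
    intro x hx
    simpa [bne] using (List.of_mem_filter hx)
  rw [h1, h2, h3]; rfl

-- the token-prepending fold factors through its accumulator
lemma pv_foldl_prepend (t : Char → String) (O : List Char) (a : String) :
    O.foldl (fun res k => t k ++ res) a = O.foldl (fun res k => t k ++ res) "" ++ a := by
  induction O generalizing a with
  | nil => simp
  | cons k O ih =>
    simp only [List.foldl_cons]
    rw [ih (t k ++ a), ih (t k ++ "")]
    simp [String.append_assoc]

-- the step of pvF is exactly prepending the token
lemma pv_step_eq (l : List Char) :
    (fun (res : String) (k : Char) =>
        if k ≠ ' ' then String.singleton k ++ PySem.Int.toStr ((l.count k : Int)) ++ res else res)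
      = (fun res k => pvTok l k ++ res) := by
  funext res k
  unfold pvTok
  split_ifs <;> simp [String.append_assoc]

lemma pv_F_cons (c : Char) (rest : List Char) :
    pvF (c :: rest)
      = pvF (rest.filter (fun x => x != c))
        ++ (if c == ' ' then "" else String.singleton c ++ PySem.Int.toStr (((c :: rest).count c : Int))) := by
  unfold pvF
  rw [pv_step_eq (c :: rest), pv_step_eq (rest.filter (fun x => x != c)), pv_ofList_cons]
  simp only [List.foldl_cons]
  have hcongr :
      (PySem.Set.ofList (rest.filter (fun x => x != c))).foldl
          (fun res k => pvTok (c :: rest) k ++ res) (pvTok (c :: rest) c ++ "")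
        = (PySem.Set.ofList (rest.filter (fun x => x != c))).foldl
          (fun res k => pvTok (rest.filter (fun x => x != c)) k ++ res) (pvTok (c :: rest) c ++ "") := by
    apply PySem.List.foldl_congr_mem
    intro acc k hk
    have hkne : k ≠ c := by
      have := (PySem.Set.mem_ofList _ k).1 hk
      simpa [bne] using (List.of_mem_filter this)
    have hcount : ((rest.filter (fun x => x != c)).count k) = (c :: rest).count k := by
      rw [List.count_filter (p := fun x => x != c) (a := k) (by simp [bne, hkne]),
        List.count_cons]
      have hck : (c == k) = false := by simp [Ne.symm hkne]
      simp [hck]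
    unfold pvTok
    rw [hcount]
  rw [hcongr, pv_foldl_prepend]
  congr 1
  unfold pvTok
  split_ifs with h1 h2 <;> simp_all

lemma pv_alt_eq_F (l : List Char) : count_str_rev_altGo l = pvF l := by
  fun_induction count_str_rev_altGo with
  | case1 => rfl
  | case2 c rest ih =>
    rw [count_str_rev_altGo.eq_def]
    rw [← count_str_rev_altGo.eq_def]
    rw [ih, pv_F_cons]
    congr 2
    simp

-- ===== VERDICT (by name: the statement is the Claim_ definition above) =====
theorem count_str_rev_spec : Claim_equal_count_str_rev := by
  intro s _
  show count_str_rev s = count_str_rev_alt s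
  unfold count_str_rev count_str_rev_alt
  rw [PySem.Dict.foldl_insert_getD_add_one_eq_counter]
  rw [pv_alt_eq_F]
  unfold pvF
  simp only [PySem.Dict.keys_counter, PySem.Dict.getD_counter]
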